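-- pv_equiv track=rewrite | github.com/davinsoman/devfest2024 | RecommenderEngine.py | similarities
-- ===== SOURCE A (Python) =====
-- def similarities(name, ratings):
--     '''
--     This function calculates how similar the rater called name is to all other raters.
--     A two-tuple is returned, where the first element is a string and the second element is an integer.
--     '''
--     x = ratings[name]
--     result = []
--
--     for i in ratings:
--         if i == name:
--             continue
--         y = ratings[i]
--         dp = 0
--         for rating1, rating2 in zip(x, y):
--             if rating1 != 0 and rating2 != 0:
--                 dp += rating1 * rating2
--         result.append((i,dp))
--     result.sort(key=lambda x: (-x[1], x[0]))
--     return result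
-- ===== SOURCE B (Python) =====
-- def similarities(name, ratings):
--     x = ratings[name]
--     # column-wise sweep: iterate over positions of x, updating all raters' scores at once
--     scores = [(i, 0) for i in ratings if i != name]
--     for p, v in enumerate(x):
--         if v == 0:
--             continue
--         scores = [(i, s + (v * ratings[i][p] if p < len(ratings[i]) and ratings[i][p] != 0 else 0))
--                   for i, s in scores]
--     scores.sort(key=lambda t: (-t[1], t[0]))
--     return scores
-- ===== Notes on version B (the rewrite author's own statement) =====
-- stated objective: alternative
-- what changed: B transposes the computation: instead of computing a full dot product per rater, it keeps one score vector for all other raters and sweeps column-by-column over the positions of the target's vector, rebuilding the whole score list at each nonzero position; sorting is unchanged.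
import Mathlib
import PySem

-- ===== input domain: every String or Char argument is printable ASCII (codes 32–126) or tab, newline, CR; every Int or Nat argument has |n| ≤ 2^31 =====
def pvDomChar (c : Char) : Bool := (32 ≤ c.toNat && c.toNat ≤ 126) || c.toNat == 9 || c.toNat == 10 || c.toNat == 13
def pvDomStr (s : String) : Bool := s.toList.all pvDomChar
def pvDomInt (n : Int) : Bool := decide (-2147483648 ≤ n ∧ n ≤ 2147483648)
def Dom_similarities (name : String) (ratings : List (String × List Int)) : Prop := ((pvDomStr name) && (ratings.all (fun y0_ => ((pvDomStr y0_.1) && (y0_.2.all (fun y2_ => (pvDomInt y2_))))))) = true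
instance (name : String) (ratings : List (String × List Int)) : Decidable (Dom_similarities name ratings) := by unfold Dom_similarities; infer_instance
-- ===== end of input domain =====

-- One honest line: B transposes the computation — a single score vector for all other
-- raters, updated column-by-column over the nonzero positions of the target's vector,
-- instead of A's per-rater dot products; same values, same sort.

-- ===== PORT A =====
def similarities (name : String) (ratings : List (String × List Int)) : List (String × Int) :=
  let d := PySem.Dict.ofList ratings
  let x := d.getD name []          -- ratings[name]; KeyError excluded by Pre_
  let result := d.keys.foldl (fun res i =>
    if i == name then res
    else
      let y := d.getD i []
      let dp := (x.zip y).foldl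
        (fun dp q => if q.1 ≠ 0 ∧ q.2 ≠ 0 then dp + q.1 * q.2 else dp) 0
      res ++ [(i, dp)]) []
  PySem.List.sorted2 result (fun p => -p.2) (fun p => p.1)

-- ===== PORT B =====
def similarities_alt (name : String) (ratings : List (String × List Int)) : List (String × Int) :=
  let d := PySem.Dict.ofList ratings
  let x := d.getD name []
  let scores0 := (d.keys.filter (fun i => i != name)).map (fun i => (i, (0 : Int)))
  let scores := (PySem.List.enumerate x).foldl (fun sc q =>
    if q.2 = 0 then sc
    else sc.map (fun t =>
      let y := d.getD t.1 []
      (t.1, t.2 + (if q.1 < (y.length : Int) ∧ PySem.List.pyGetD y q.1 0 ≠ 0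
                   then q.2 * PySem.List.pyGetD y q.1 0 else 0)))) scores0
  PySem.List.sorted2 scores (fun p => -p.2) (fun p => p.1)

-- ===== PRECONDITION & SPEC =====
-- Pre_ excludes exactly the inputs where A raises KeyError: name not a key of ratings.
def Pre_similarities (name : String) (ratings : List (String × List Int)) : Prop :=
  name ∈ ratings.map Prod.fst
instance (name : String) (ratings : List (String × List Int)) : Decidable (Pre_similarities name ratings) := by unfold Pre_similarities; infer_instance
def pvWitness_similarities : String × (List (String × List Int)) :=
  ("a", [("a", [1, 0, 2]), ("b", [3, 4])])
def Spec_similarities (name : String) (ratings : List (String × List Int)) (out : List (String × Int)) : Prop := out = similarities_alt name ratings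
instance (name : String) (ratings : List (String × List Int)) (out : List (String × Int)) : Decidable (Spec_similarities name ratings out) := by unfold Spec_similarities; infer_instance

-- ===== CLAIM (what is proved, stated in full; the proofs are below) =====
def Claim_equal_similarities : Prop := ∀ (name : String) (ratings : List (String × List Int)), Dom_similarities name ratings → Pre_similarities name ratings → Spec_similarities name ratings (similarities name ratings)

-- ===== LEMMAS AND PROOFS =====

-- A's skip-and-append loop is filter-then-map.
theorem foldl_skip_append {α β : Type} (p : α → Bool) (f : α → β) :
    ∀ (l : List α) (acc : List β),
      l.foldl (fun res i => if p i then res else res ++ [f i]) acc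
        = acc ++ (l.filter (fun i => !p i)).map f := by
  intro l
  induction l with
  | nil => intro acc; simp
  | cons a t ih =>
    intro acc
    by_cases h : p a = true <;> simp [List.foldl_cons, h, ih]

-- probing the empty vector contributes nothing
theorem foldl_probe_nil (l : List (Int × Int)) (acc : Int) :
    l.foldl (fun s q =>
      if q.1 < (([] : List Int).length : Int) ∧ PySem.List.pyGetD ([] : List Int) q.1 0 ≠ 0
      then s + q.2 * PySem.List.pyGetD ([] : List Int) q.1 0 else s) acc = acc := by
  induction l generalizing acc with
  | nil => rfl
  | cons a t ih =>
    simp only [List.foldl_cons]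
    rw [if_neg]
    · exact ih acc
    · rintro ⟨-, h2⟩
      apply h2
      rw [PySem.List.pyGetD_of_none]
      rw [PySem.List.pyGet?_eq_none_iff]
      simp [PySem.Raise.InRange]

-- shifting all positions by one = dropping the head of the probed vector
theorem foldl_probe_shift (b : Int) (t : List Int) :
    ∀ (l : List (Int × Int)) (acc : Int), (∀ q ∈ l, 0 ≤ q.1) →
      (l.map (fun q => (q.1 + 1, q.2))).foldl (fun s q =>
          if q.1 < ((b :: t).length : Int) ∧ PySem.List.pyGetD (b :: t) q.1 0 ≠ 0
          then s + q.2 * PySem.List.pyGetD (b :: t) q.1 0 else s) acc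
        = l.foldl (fun s q =>
          if q.1 < (t.length : Int) ∧ PySem.List.pyGetD t q.1 0 ≠ 0
          then s + q.2 * PySem.List.pyGetD t q.1 0 else s) acc := by
  intro l
  induction l with
  | nil => intro acc _; rfl
  | cons a l' ih =>
    intro acc hnn
    have ha : 0 ≤ a.1 := hnn a (List.mem_cons_self ..)
    have hget : PySem.List.pyGetD (b :: t) (a.1 + 1) 0 = PySem.List.pyGetD t a.1 0 := by
      by_cases hlt : a.1 < (t.length : Int)
      · rw [PySem.List.pyGetD_eq_getElem (b :: t) 0 (by omega) (by simp only [List.length_cons]; push_cast; omega),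
            PySem.List.pyGetD_eq_getElem t 0 ha (by exact_mod_cast hlt)]
        have hnat : (a.1 + 1).toNat = a.1.toNat + 1 := by omega
        simp [hnat]
      · rw [PySem.List.pyGetD_of_none, PySem.List.pyGetD_of_none]
        · rw [PySem.List.pyGet?_eq_none_iff]; simp [PySem.Raise.InRange]; omega
        · rw [PySem.List.pyGet?_eq_none_iff]; simp [PySem.Raise.InRange]; omega
    simp only [List.map_cons, List.foldl_cons]
    have hstep : (if a.1 + 1 < ((b :: t).length : Int) ∧ PySem.List.pyGetD (b :: t) (a.1 + 1) 0 ≠ 0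
          then acc + a.2 * PySem.List.pyGetD (b :: t) (a.1 + 1) 0 else acc)
        = (if a.1 < (t.length : Int) ∧ PySem.List.pyGetD t a.1 0 ≠ 0
          then acc + a.2 * PySem.List.pyGetD t a.1 0 else acc) := by
      rw [hget]
      refine if_congr ?_ rfl rfl
      constructor
      · rintro ⟨h1, h2⟩
        exact ⟨by simp only [List.length_cons] at h1; push_cast at h1 ⊢; omega, h2⟩
      · rintro ⟨h1, h2⟩
        exact ⟨by simp only [List.length_cons] at h1 ⊢; push_cast at h1 ⊢; omega, h2⟩
    rw [hstep]
    exact ih _ (fun q hq => hnn q (List.mem_cons_of_mem _ hq))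

-- enumerate with start s+1 is the shift of enumerate with start s
theorem enumerate_shift {α : Type} : ∀ (x : List α) (s : Int),
    PySem.List.enumerate x (s + 1)
      = (PySem.List.enumerate x s).map (fun q => (q.1 + 1, q.2)) := by
  intro x
  induction x with
  | nil => intro s; rfl
  | cons a t ih =>
    intro s
    rw [PySem.List.enumerate_cons, PySem.List.enumerate_cons, ih (s + 1)]
    simp

theorem enumerate_nonneg {α : Type} (x : List α) (q : Int × α)
    (hq : q ∈ PySem.List.enumerate x 0) : 0 ≤ q.1 := by
  rcases (PySem.List.mem_enumerate_iff x 0 q).1 hq with ⟨k, hk, rfl⟩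
  simp

-- A's zip dot-product = per-rater probe of the nonzero positions of x
theorem dp_eq : ∀ (x y : List Int) (acc : Int),
    (x.zip y).foldl (fun dp q => if q.1 ≠ 0 ∧ q.2 ≠ 0 then dp + q.1 * q.2 else dp) acc
      = ((PySem.List.enumerate x).filter (fun q => q.2 != 0)).foldl (fun s q =>
          if q.1 < (y.length : Int) ∧ PySem.List.pyGetD y q.1 0 ≠ 0
          then s + q.2 * PySem.List.pyGetD y q.1 0 else s) acc := by
  intro x
  induction x with
  | nil => intro y acc; simp [PySem.List.enumerate_nil]
  | cons a x' ih =>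
    intro y acc
    have henum : PySem.List.enumerate (a :: x') (0 : Int)
        = (0, a) :: (PySem.List.enumerate x' 0).map (fun q => (q.1 + 1, q.2)) := by
      rw [PySem.List.enumerate_cons, show (0 : Int) + 1 = 0 + 1 from rfl, enumerate_shift x' 0]
    have hfmap : ((PySem.List.enumerate x' 0).map (fun q => (q.1 + 1, q.2))).filter
          (fun q => q.2 != 0)
        = ((PySem.List.enumerate x' 0).filter (fun q => q.2 != 0)).map
          (fun q => (q.1 + 1, q.2)) := by
      rw [List.filter_map]; rfl
    have hnn : ∀ q ∈ (PySem.List.enumerate x' 0).filter (fun q => q.2 != 0), 0 ≤ q.1 :=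
      fun q hq => enumerate_nonneg x' q (List.mem_of_mem_filter hq)
    cases y with
    | nil =>
      simp only [List.zip_nil_right, List.foldl_nil]
      rw [foldl_probe_nil]
    | cons b y' =>
      simp only [List.zip_cons_cons, List.foldl_cons, henum]
      by_cases hA : a = 0
      · rw [List.filter_cons_of_neg (by simp [hA]), hfmap,
            foldl_probe_shift b y' _ _ hnn, if_neg (by simp [hA]), ih y']
      · rw [List.filter_cons_of_pos (by simp [hA])]
        simp only [List.foldl_cons]
        have hhead : (if (0 : Int) < (((b :: y').length : Nat) : Int) ∧
              PySem.List.pyGetD (b :: y') 0 0 ≠ 0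
            then acc + a * PySem.List.pyGetD (b :: y') 0 0 else acc)
            = (if a ≠ 0 ∧ b ≠ 0 then acc + a * b else acc) := by
          rw [PySem.List.pyGetD_zero_cons]
          by_cases hB : b = 0
          · rw [if_neg (by simp [hB]), if_neg (by simp [hB])]
          · rw [if_pos ⟨by simp only [List.length_cons]; push_cast; omega, hB⟩, if_pos ⟨hA, hB⟩]
        rw [hhead, hfmap, foldl_probe_shift b y' _ _ hnn, ih y']

-- the column-wise sweep over a score vector computes each rater's probe fold independently
theorem sweep_invariant {κ : Type} (Y : κ → List Int) :
    ∀ (l : List (Int × Int)) (others : List κ) (g : κ → Int),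
      l.foldl (fun sc q =>
        if q.2 = 0 then sc
        else sc.map (fun t =>
          (t.1, t.2 + (if q.1 < ((Y t.1).length : Int) ∧ PySem.List.pyGetD (Y t.1) q.1 0 ≠ 0
                       then q.2 * PySem.List.pyGetD (Y t.1) q.1 0 else 0))))
        (others.map (fun i => (i, g i)))
      = others.map (fun i => (i,
          l.foldl (fun s q =>
            if q.2 = 0 then s
            else s + (if q.1 < ((Y i).length : Int) ∧ PySem.List.pyGetD (Y i) q.1 0 ≠ 0
                      then q.2 * PySem.List.pyGetD (Y i) q.1 0 else 0)) (g i))) := by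
  intro l
  induction l with
  | nil => intro others g; simp
  | cons a t ih =>
    intro others g
    by_cases ha : a.2 = 0
    · simp only [List.foldl_cons, if_pos ha]
      exact ih others g
    · simp only [List.foldl_cons, if_neg ha, List.map_map]
      have heq : ((fun t : κ × Int =>
            (t.1, t.2 + (if a.1 < ((Y t.1).length : Int) ∧ PySem.List.pyGetD (Y t.1) a.1 0 ≠ 0
                         then a.2 * PySem.List.pyGetD (Y t.1) a.1 0 else 0))) ∘
          (fun i => (i, g i)))
          = fun i => (i, g i +
              (if a.1 < ((Y i).length : Int) ∧ PySem.List.pyGetD (Y i) a.1 0 ≠ 0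
               then a.2 * PySem.List.pyGetD (Y i) a.1 0 else 0)) := rfl
      rw [heq]
      exact ih others (fun i => g i +
        (if a.1 < ((Y i).length : Int) ∧ PySem.List.pyGetD (Y i) a.1 0 ≠ 0
         then a.2 * PySem.List.pyGetD (Y i) a.1 0 else 0))

-- skipping-zero fold over the full enumeration = probe fold over the filtered enumeration
theorem fold_skip_eq_fold_filter (y : List Int) :
    ∀ (l : List (Int × Int)) (acc : Int),
      l.foldl (fun s q =>
        if q.2 = 0 then s
        else s + (if q.1 < (y.length : Int) ∧ PySem.List.pyGetD y q.1 0 ≠ 0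
                  then q.2 * PySem.List.pyGetD y q.1 0 else 0)) acc
      = (l.filter (fun q => q.2 != 0)).foldl (fun s q =>
          if q.1 < (y.length : Int) ∧ PySem.List.pyGetD y q.1 0 ≠ 0
          then s + q.2 * PySem.List.pyGetD y q.1 0 else s) acc := by
  intro l
  induction l with
  | nil => intro acc; rfl
  | cons a t ih =>
    intro acc
    by_cases ha : a.2 = 0
    · rw [List.filter_cons_of_neg (by simp [ha])]
      simp only [List.foldl_cons, if_pos ha]
      exact ih acc
    · rw [List.filter_cons_of_pos (by simp [ha])]
      simp only [List.foldl_cons, if_neg ha]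
      rw [ih]
      congr 1
      by_cases hg : a.1 < (y.length : Int) ∧ PySem.List.pyGetD y a.1 0 ≠ 0
      · rw [if_pos hg, if_pos hg]
      · rw [if_neg hg, if_neg hg]; ring

theorem result_eq (name : String) (ratings : List (String × List Int)) :
    similarities name ratings = similarities_alt name ratings := by
  unfold similarities similarities_alt
  simp only []
  set d := PySem.Dict.ofList ratings with hd
  set x := d.getD name []
  congr 1
  rw [foldl_skip_append (fun i => i == name)
    (fun i => (i, ((x.zip (d.getD i []))).foldl
      (fun dp q => if q.1 ≠ 0 ∧ q.2 ≠ 0 then dp + q.1 * q.2 else dp) 0)),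
    List.nil_append,
    sweep_invariant (fun i => d.getD i []) (PySem.List.enumerate x)
      (d.keys.filter (fun i => i != name)) (fun _ => 0)]
  have hfil : d.keys.filter (fun i => !(i == name)) = d.keys.filter (fun i => i != name) := rfl
  rw [hfil]
  apply List.map_congr_left
  intro i _
  rw [dp_eq, fold_skip_eq_fold_filter]

-- ===== VERDICT (by name: the statement is the Claim_ definition above) =====
theorem similarities_spec : Claim_equal_similarities := by
  intro name ratings _ _
  unfold Spec_similarities
  exact result_eq name ratings
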